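-- pv_equiv track=rewrite | github.com/koushik-sarma/SmartDocChat | services/comparison_service.py | _find_unique_content
-- ===== SOURCE A (Python) =====
-- from typing import List, Dict, Set
--
-- def _find_unique_content(doc_word_sets: Dict[str, Set[str]]) -> Dict[str, List[str]]:
--     """Find unique words in each document."""
--     unique_content = {}
--
--     for doc_name, word_set in doc_word_sets.items():
--         # Find words unique to this document
--         other_words = set()
--         for other_doc, other_words_set in doc_word_sets.items():
--             if other_doc != doc_name:
--                 other_words.update(other_words_set)
--
--         unique_words = word_set - other_words
--
--         # Return top 15 unique words, sorted
--         unique_content[doc_name] = sorted(unique_words)[:15]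
--
--     return unique_content
-- ===== SOURCE B (Python) =====
-- from typing import List, Dict, Set
--
-- def _find_unique_content(doc_word_sets: Dict[str, Set[str]]) -> Dict[str, List[str]]:
--     """Find unique words in each document: count in how many documents each word
--     occurs (one pass), then keep the words whose count is 1."""
--     doc_count = {}
--     for word_set in doc_word_sets.values():
--         for w in word_set:
--             doc_count[w] = doc_count.get(w, 0) + 1
--     return {
--         name: sorted(w for w in word_set if doc_count[w] == 1)[:15]
--         for name, word_set in doc_word_sets.items()
--     }
-- ===== Notes on version B (the rewrite author's own statement) =====
-- stated objective: faster
-- what changed: Instead of rebuilding, for every document, the union of all other documents' words (O(N * total_words)), B counts in one pass how many documents contain each word and then keeps, per document, the words whose document-count is 1.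
import Mathlib
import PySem

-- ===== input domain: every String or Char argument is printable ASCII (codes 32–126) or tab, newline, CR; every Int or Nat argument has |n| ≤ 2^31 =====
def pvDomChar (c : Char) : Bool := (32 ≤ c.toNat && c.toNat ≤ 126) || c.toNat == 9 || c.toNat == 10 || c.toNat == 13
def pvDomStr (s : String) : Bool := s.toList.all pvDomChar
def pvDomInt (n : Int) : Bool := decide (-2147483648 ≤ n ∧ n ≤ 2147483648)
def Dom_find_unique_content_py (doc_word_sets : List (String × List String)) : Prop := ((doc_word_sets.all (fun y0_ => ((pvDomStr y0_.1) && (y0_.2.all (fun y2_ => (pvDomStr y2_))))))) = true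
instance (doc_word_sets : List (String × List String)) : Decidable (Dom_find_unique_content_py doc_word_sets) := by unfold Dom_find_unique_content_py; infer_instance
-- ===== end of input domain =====

-- B replaces A's per-document union of all OTHER documents' words by a single
-- docs-per-word count, keeping the words whose count is 1 (faster: one counting
-- pass instead of a quadratic union pass per document).

-- ===== PORT A =====
def find_unique_content_py (doc_word_sets : List (String × List String)) : List (String × List String) :=
  doc_word_sets.foldl (fun unique_content p =>
    -- other_words = set(); for other_doc, other_words_set in …: if other_doc != doc_name: other_words.update(other_words_set)
    let other_words : PySem.Set String :=
      doc_word_sets.foldl (fun (ow : PySem.Set String) q =>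
        if q.1 ≠ p.1 then PySem.Set.update ow q.2 else ow) PySem.Set.empty
    -- unique_words = word_set - other_words
    let unique_words : PySem.Set String := PySem.Set.diff p.2 other_words
    -- sorted(unique_words)[:15]  (slice [:15] of a list = take 15)
    unique_content ++ [(p.1, (PySem.List.sorted unique_words (fun w => w) false).take 15)])
    []

-- ===== PORT B =====
def find_unique_content_py_alt (doc_word_sets : List (String × List String)) : List (String × List String) :=
  -- doc_count[w] = number of documents whose word set contains w
  let doc_count : PySem.Dict String Int :=
    doc_word_sets.foldl (fun dc (p : String × List String) =>
      p.2.foldl (fun dc w => dc.insert w (dc.getD w 0 + 1)) dc) PySem.Dict.empty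
  doc_word_sets.foldl (fun out p =>
    out ++ [(p.1, (PySem.List.sorted (p.2.filter (fun w => doc_count.getD w 0 == 1)) (fun w => w) false).take 15)])
    []

-- ===== PRECONDITION & SPEC =====
-- Pre_ states the invariants of A's argument type Dict[str, Set[str]] that the
-- assoc-list/distinct-list encoding cannot enforce: doc names are pairwise
-- distinct (dict keys) and each word list is duplicate-free (a set); Lean lists
-- violating them correspond to no Python input of A.
def Pre_find_unique_content_py (doc_word_sets : List (String × List String)) : Prop :=
  (doc_word_sets.map Prod.fst).Nodup ∧ ∀ p ∈ doc_word_sets, p.2.Nodup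
instance (doc_word_sets : List (String × List String)) : Decidable (Pre_find_unique_content_py doc_word_sets) := by unfold Pre_find_unique_content_py; infer_instance

def pvWitness_find_unique_content_py : (List (String × List String)) :=
  [("a.txt", ["cat", "dog"]), ("b.txt", ["dog", "emu"])]

def Spec_find_unique_content_py (doc_word_sets : List (String × List String)) (out : List (String × List String)) : Prop := out = find_unique_content_py_alt doc_word_sets
instance (doc_word_sets : List (String × List String)) (out : List (String × List String)) : Decidable (Spec_find_unique_content_py doc_word_sets out) := by unfold Spec_find_unique_content_py; infer_instance

-- ===== CLAIM (what is proved, stated in full; the proofs are below) =====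
def Claim_equal_find_unique_content_py : Prop := ∀ (doc_word_sets : List (String × List String)), Dom_find_unique_content_py doc_word_sets → Pre_find_unique_content_py doc_word_sets → Spec_find_unique_content_py doc_word_sets (find_unique_content_py doc_word_sets)

-- ===== LEMMAS AND PROOFS =====

-- B's counting fold computes, for every word, the total number of occurrences
-- of that word over all word lists.
theorem pv_counts_getD (l : List (String × List String)) (dc : PySem.Dict String Int) (w : String) :
    (l.foldl (fun dc (p : String × List String) =>
        p.2.foldl (fun dc w => dc.insert w (dc.getD w 0 + 1)) dc) dc).getD w 0
      = dc.getD w 0 + (((l.map (fun p => p.2.count w)).sum : Nat) : Int) := by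
  induction l generalizing dc with
  | nil => simp
  | cons p t ih =>
    simp only [List.foldl_cons, ih, PySem.Dict.getD_foldl_insert_add_one, List.map_cons,
      List.sum_cons]
    push_cast
    ring

-- membership in A's other_words accumulator
theorem pv_mem_other (l : List (String × List String)) (s : PySem.Set String) (p1 w : String) :
    w ∈ l.foldl (fun (ow : PySem.Set String) q =>
        if q.1 ≠ p1 then PySem.Set.update ow q.2 else ow) s
      ↔ w ∈ s ∨ ∃ q ∈ l, q.1 ≠ p1 ∧ w ∈ q.2 := by
  induction l generalizing s with
  | nil => simp
  | cons q t ih =>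
    simp only [List.foldl_cons]
    by_cases h : q.1 = p1
    · rw [if_neg (by simpa using h), ih]
      constructor
      · rintro (hs | ⟨r, hr, hne, hw'⟩)
        · exact Or.inl hs
        · exact Or.inr ⟨r, List.mem_cons_of_mem _ hr, hne, hw'⟩
      · rintro (hs | ⟨r, hr, hne, hw'⟩)
        · exact Or.inl hs
        · rcases List.mem_cons.mp hr with hr | hr
          · exact absurd (by rw [hr]; exact h) hne
          · exact Or.inr ⟨r, hr, hne, hw'⟩
    · rw [if_pos h, ih]
      constructor
      · rintro (hs | hex)
        · rcases (PySem.Set.mem_update s q.2 w).mp hs with hs | hw'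
          · exact Or.inl hs
          · exact Or.inr ⟨q, List.mem_cons_self, h, hw'⟩
        · obtain ⟨r, hr, hne, hw'⟩ := hex
          exact Or.inr ⟨r, List.mem_cons_of_mem _ hr, hne, hw'⟩
      · rintro (hs | ⟨r, hr, hne, hw'⟩)
        · exact Or.inl ((PySem.Set.mem_update s q.2 w).mpr (Or.inl hs))
        · rcases List.mem_cons.mp hr with hr | hr
          · exact Or.inl ((PySem.Set.mem_update s q.2 w).mpr (Or.inr (hr ▸ hw')))
          · exact Or.inr ⟨r, hr, hne, hw'⟩

-- With distinct doc names and duplicate-free word lists, the total occurrence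
-- count of a word w ∈ p.2 is 1 exactly when no other document contains w.
theorem pv_sum_eq_one_iff (d : List (String × List String)) (p : String × List String) (w : String)
    (hk : (d.map Prod.fst).Nodup) (hv : ∀ q ∈ d, q.2.Nodup) (hp : p ∈ d) (hw : w ∈ p.2) :
    ((d.map (fun q => q.2.count w)).sum = 1) ↔ ¬ ∃ q ∈ d, q.1 ≠ p.1 ∧ w ∈ q.2 := by
  obtain ⟨l1, l2, rfl⟩ := List.append_of_mem hp
  have hcp : p.2.count w = 1 := by
    have h1 : p.2.count w ≤ 1 := List.nodup_iff_count_le_one.mp (hv p hp) w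
    have h2 : 0 < p.2.count w := List.count_pos_iff.mpr hw
    omega
  have hne : ∀ q, (q ∈ l1 ∨ q ∈ l2) → q.1 ≠ p.1 := by
    intro q hq
    simp only [List.map_append, List.map_cons, List.nodup_append, List.nodup_cons] at hk
    rcases hq with hq | hq
    · intro h
      exact hk.2.2 _ (List.mem_map_of_mem hq) _ List.mem_cons_self h
    · intro h
      exact hk.2.1.1 (h ▸ List.mem_map_of_mem hq)
  simp only [List.map_append, List.map_cons, List.sum_append, List.sum_cons, hcp]
  constructor
  · rintro hsum ⟨q, hq, hqne, hqw⟩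
    have hq' : q ∈ l1 ∨ q ∈ l2 := by
      rcases List.mem_append.mp hq with h | h
      · exact Or.inl h
      · rcases List.mem_cons.mp h with h | h
        · exact absurd (h ▸ rfl) hqne
        · exact Or.inr h
    have hqc : 0 < q.2.count w := List.count_pos_iff.mpr hqw
    rcases hq' with h | h
    · have : q.2.count w ≤ (l1.map (fun q => q.2.count w)).sum :=
        List.single_le_sum (by intro x hx; omega) _ (List.mem_map_of_mem h)
      omega
    · have : q.2.count w ≤ (l2.map (fun q => q.2.count w)).sum :=
        List.single_le_sum (by intro x hx; omega) _ (List.mem_map_of_mem h)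
      omega
  · intro hnex
    have hz : ∀ (l : List (String × List String)), (∀ q ∈ l, q ∈ l1 ∨ q ∈ l2) →
        (l.map (fun q => q.2.count w)).sum = 0 := by
      intro l hl
      apply List.sum_eq_zero
      intro x hx
      obtain ⟨q, hq, rfl⟩ := List.mem_map.mp hx
      have : w ∉ q.2 := by
        intro hwq
        exact hnex ⟨q, by rcases hl q hq with h | h
                          · exact List.mem_append.mpr (Or.inl h)
                          · exact List.mem_append.mpr (Or.inr (List.mem_cons_of_mem _ h)),
                    hne q (hl q hq), hwq⟩
      simp [List.count_eq_zero.mpr this]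
    have h1 := hz l1 (fun q hq => Or.inl hq)
    have h2 := hz l2 (fun q hq => Or.inr hq)
    omega

-- the per-word filter conditions of A and B agree
theorem pv_keep_iff (d : List (String × List String)) (p : String × List String) (w : String)
    (hk : (d.map Prod.fst).Nodup) (hv : ∀ q ∈ d, q.2.Nodup) (hp : p ∈ d) (hw : w ∈ p.2) :
    (!(PySem.Set.contains
        (d.foldl (fun (ow : PySem.Set String) q =>
          if q.1 ≠ p.1 then PySem.Set.update ow q.2 else ow) PySem.Set.empty) w))
      = ((d.foldl (fun dc (p : String × List String) =>
            p.2.foldl (fun dc w => dc.insert w (dc.getD w 0 + 1)) dc) (PySem.Dict.empty : PySem.Dict String Int)).getD w 0 == 1) := by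
  have hoth : (PySem.Set.contains
      (d.foldl (fun (ow : PySem.Set String) q =>
        if q.1 ≠ p.1 then PySem.Set.update ow q.2 else ow) PySem.Set.empty) w) = true
      ↔ ∃ q ∈ d, q.1 ≠ p.1 ∧ w ∈ q.2 := by
    rw [PySem.Set.contains_iff, pv_mem_other]
    simp [PySem.Set.empty]
  have hcnt : (d.foldl (fun dc (p : String × List String) =>
      p.2.foldl (fun dc w => dc.insert w (dc.getD w 0 + 1)) dc) (PySem.Dict.empty : PySem.Dict String Int)).getD w 0
      = (((d.map (fun q => q.2.count w)).sum : Nat) : Int) := by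
    rw [pv_counts_getD]; simp
  by_cases hex : ∃ q ∈ d, q.1 ≠ p.1 ∧ w ∈ q.2
  · have h1 : (PySem.Set.contains _ w) = true := hoth.mpr hex
    have h2 : (d.map (fun q => q.2.count w)).sum ≠ 1 :=
      fun h => ((pv_sum_eq_one_iff d p w hk hv hp hw).mp h) hex
    rw [h1]
    simp only [Bool.not_true, hcnt]
    symm
    rw [beq_eq_false_iff_ne]
    intro h
    exact h2 (by exact_mod_cast h)
  · have h1 : (PySem.Set.contains
        (d.foldl (fun (ow : PySem.Set String) q =>
          if q.1 ≠ p.1 then PySem.Set.update ow q.2 else ow) PySem.Set.empty) w) = false := by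
      rcases Bool.eq_false_or_eq_true (PySem.Set.contains
        (d.foldl (fun (ow : PySem.Set String) q =>
          if q.1 ≠ p.1 then PySem.Set.update ow q.2 else ow) PySem.Set.empty) w) with h | h
      · exact absurd (hoth.mp h) hex
      · exact h
    have h2 : (d.map (fun q => q.2.count w)).sum = 1 :=
      (pv_sum_eq_one_iff d p w hk hv hp hw).mpr hex
    rw [h1]
    have hX : (d.foldl (fun dc (p : String × List String) =>
        p.2.foldl (fun dc w => dc.insert w (dc.getD w 0 + 1)) dc) (PySem.Dict.empty : PySem.Dict String Int)).getD w 0 = 1 := by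
      rw [hcnt, h2]; rfl
    rw [hX]
    rfl

-- ===== VERDICT (by name: the statement is the Claim_ definition above) =====
theorem find_unique_content_py_spec : Claim_equal_find_unique_content_py := by
  intro d _ hpre
  obtain ⟨hk, hv⟩ := hpre
  show find_unique_content_py d = find_unique_content_py_alt d
  simp only [find_unique_content_py, find_unique_content_py_alt, PySem.Set.diff,
    PySem.List.foldl_append_singleton_eq_map, List.nil_append]
  apply List.map_congr_left
  intro p hp
  have hfilter : p.2.filter (fun x =>
      !(PySem.Set.contains
        (d.foldl (fun (ow : PySem.Set String) q =>
          if q.1 ≠ p.1 then PySem.Set.update ow q.2 else ow) PySem.Set.empty) x))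
      = p.2.filter (fun w =>
        ((d.foldl (fun dc (p : String × List String) =>
            p.2.foldl (fun dc w => dc.insert w (dc.getD w 0 + 1)) dc) (PySem.Dict.empty : PySem.Dict String Int)).getD w 0 == 1)) := by
    apply List.filter_congr
    intro w hw
    exact pv_keep_iff d p w hk hv hp hw
  rw [hfilter]
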